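-- pv_equiv track=rewrite | github.com/leeliu103/TinygradProfiler | tinygrad_profiler/_orchestrator.py | _display_kernel_name
-- ===== SOURCE A (Python) =====
-- def _display_kernel_name(raw_name: str) -> str:
--   prefix = raw_name[:param_start] if (param_start := _top_level_param_start(raw_name)) is not None else raw_name
--   last_space = -1
--   depth = 0
--   for idx, ch in enumerate(prefix):
--     if ch == "<":
--       depth += 1
--     elif ch == ">":
--       depth = max(0, depth - 1)
--     elif ch.isspace() and depth == 0:
--       last_space = idx
--   return (prefix[last_space + 1:] if last_space >= 0 else prefix).strip() or raw_name
--
-- def _top_level_param_start(signature: str) -> int | None: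
--   depth = 0
--   for idx, ch in enumerate(signature):
--     if ch == "<":
--       depth += 1
--     elif ch == ">":
--       depth = max(0, depth - 1)
--     elif ch == "(" and depth == 0:
--       return idx
--   return None
-- ===== SOURCE B (Python) =====
-- def _display_kernel_name(raw_name: str) -> str:
--     depth = 0
--     last_space = -1
--     param_index = None
--     for idx, ch in enumerate(raw_name):
--         if ch == "<":
--             depth += 1
--         elif ch == ">":
--             depth = max(0, depth - 1)
--         elif depth == 0:
--             if ch == "(":
--                 param_index = idx
--                 break
--             if ch.isspace():
--                 last_space = idx
--     prefix = raw_name if param_index is None else raw_name[:param_index]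
--     return (prefix[last_space + 1:] if last_space >= 0 else prefix).strip() or raw_name
-- ===== Notes on version B (the rewrite author's own statement) =====
-- stated objective: simpler
-- what changed: Replaces the two separate depth-tracking scans (a helper finding the first top-level opening parenthesis plus a second loop over the prefix) with a single pass over raw_name that maintains one depth counter, records the last top-level space, and breaks at the first top-level opening parenthesis.
import Mathlib
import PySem

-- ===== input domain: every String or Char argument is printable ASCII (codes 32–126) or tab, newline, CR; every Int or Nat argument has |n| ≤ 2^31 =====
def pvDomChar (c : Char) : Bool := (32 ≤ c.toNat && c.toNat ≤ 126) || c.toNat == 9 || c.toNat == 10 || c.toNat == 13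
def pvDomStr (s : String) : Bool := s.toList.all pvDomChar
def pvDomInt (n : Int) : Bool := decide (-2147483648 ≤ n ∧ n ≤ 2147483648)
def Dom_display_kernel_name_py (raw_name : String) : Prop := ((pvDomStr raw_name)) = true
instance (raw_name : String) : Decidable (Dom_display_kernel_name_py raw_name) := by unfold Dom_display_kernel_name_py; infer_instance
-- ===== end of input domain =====

-- B fuses A's two depth-tracking scans (helper finding the top-level '(' + prefix loop) into a
-- single pass that records the last top-level space and breaks at the first top-level opening parenthesis;
-- objective: simpler (one scan instead of two), same values everywhere.

-- ===== PORT A =====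
-- _top_level_param_start: depth counter over '<'/'>', returns index of first '(' at depth 0
def tlpsA : List Char → Nat → Int → Option Nat
  | [], _, _ => none
  | c :: cs, idx, depth =>
    if c = '<' then tlpsA cs (idx + 1) (depth + 1)
    else if c = '>' then tlpsA cs (idx + 1) (max 0 (depth - 1))
    else if c = '(' ∧ depth = 0 then some idx
    else tlpsA cs (idx + 1) depth

-- A's second loop over the prefix: last_space of whitespace seen at depth 0
def loopA : List Char → Nat → Int → Int → Int
  | [], _, ls, _ => ls
  | c :: cs, idx, ls, depth =>
    if c = '<' then loopA cs (idx + 1) ls (depth + 1)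
    else if c = '>' then loopA cs (idx + 1) ls (max 0 (depth - 1))
    else if PySem.Chars.isspace c = true ∧ depth = 0 then loopA cs (idx + 1) (Int.ofNat idx) depth
    else loopA cs (idx + 1) ls depth

def display_kernel_name_py (raw_name : String) : String :=
  let cs := raw_name.toList
  let prefixC := match tlpsA cs 0 0 with
    | some i => cs.take i          -- raw_name[:param_start]
    | none => cs
  let last_space := loopA prefixC 0 (-1) 0
  -- prefix[last_space+1:] if last_space >= 0 else prefix; last_space+1 ≥ 0 so drop is exact
  let region := if last_space ≥ 0 then prefixC.drop (last_space.toNat + 1) else prefixC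
  let stripped := PySem.Chars.strip region
  if stripped = [] then raw_name else String.mk stripped

-- ===== PORT B =====
-- one fused pass: (last_space, param_index); break at a top-level '('
def loopB : List Char → Nat → Int → Int → Int × Option Nat
  | [], _, ls, _ => (ls, none)
  | c :: cs, idx, ls, depth =>
    if c = '<' then loopB cs (idx + 1) ls (depth + 1)
    else if c = '>' then loopB cs (idx + 1) ls (max 0 (depth - 1))
    else if depth = 0 then
      if c = '(' then (ls, some idx)
      else if PySem.Chars.isspace c = true then loopB cs (idx + 1) (Int.ofNat idx) depth
      else loopB cs (idx + 1) ls depth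
    else loopB cs (idx + 1) ls depth

def display_kernel_name_py_alt (raw_name : String) : String :=
  let cs := raw_name.toList
  let r := loopB cs 0 (-1) 0
  let prefixC := match r.2 with
    | some i => cs.take i
    | none => cs
  let region := if r.1 ≥ 0 then prefixC.drop (r.1.toNat + 1) else prefixC
  let stripped := PySem.Chars.strip region
  if stripped = [] then raw_name else String.mk stripped

-- ===== PRECONDITION & SPEC =====
def Spec_display_kernel_name_py (raw_name : String) (out : String) : Prop := out = display_kernel_name_py_alt raw_name
instance (raw_name : String) (out : String) : Decidable (Spec_display_kernel_name_py raw_name out) := by unfold Spec_display_kernel_name_py; infer_instance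

-- ===== CLAIM (what is proved, stated in full; the proofs are below) =====
def Claim_equal_display_kernel_name_py : Prop := ∀ (raw_name : String), Dom_display_kernel_name_py raw_name → Spec_display_kernel_name_py raw_name (display_kernel_name_py raw_name)

-- ===== LEMMAS AND PROOFS =====

-- index-free version of tlpsA (relative index of the first top-level '(')
def tlps0 : List Char → Int → Option Nat
  | [], _ => none
  | c :: cs, depth =>
    if c = '<' then (tlps0 cs (depth + 1)).map (· + 1)
    else if c = '>' then (tlps0 cs (max 0 (depth - 1))).map (· + 1)
    else if c = '(' ∧ depth = 0 then some 0
    else (tlps0 cs depth).map (· + 1)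

theorem tlpsA_eq (cs : List Char) : ∀ (idx : Nat) (depth : Int),
    tlpsA cs idx depth = (tlps0 cs depth).map (· + idx) := by
  induction cs with
  | nil => intro idx depth; simp [tlpsA, tlps0]
  | cons c cs ih =>
    intro idx depth
    by_cases h1 : c = '<'
    · simp [tlpsA, tlps0, h1, ih, Option.map_map]
      cases tlps0 cs (depth + 1) <;> simp <;> omega
    · by_cases h2 : c = '>'
      · simp [tlpsA, tlps0, h1, h2, ih, Option.map_map]
        cases tlps0 cs (max 0 (depth - 1)) <;> simp <;> omega
      · by_cases h3 : c = '(' ∧ depth = 0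
        · simp [tlpsA, tlps0, h1, h2, h3]
        · simp [tlpsA, tlps0, h1, h2, h3, ih, Option.map_map]
          cases tlps0 cs depth <;> simp <;> omega

-- the fused loop = A's prefix loop on the cut prefix, paired with the '(' index
theorem loopB_eq (cs : List Char) : ∀ (idx : Nat) (ls depth : Int),
    loopB cs idx ls depth =
      (loopA (match tlps0 cs depth with | some i => cs.take i | none => cs) idx ls depth,
       (tlps0 cs depth).map (· + idx)) := by
  induction cs with
  | nil => intro idx ls depth; simp [loopB, loopA, tlps0]
  | cons c cs ih =>
    intro idx ls depth
    by_cases h1 : c = '<'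
    · have hne : PySem.Chars.isspace c = true ∧ (depth + 1) = 0 → False := by
        intro ⟨hs, _⟩; subst h1; simp [PySem.Chars.isspace] at hs
      cases h : tlps0 cs (depth + 1) with
      | none => simp [loopB, tlps0, h1, h, ih, loopA, hne, Option.map_map]
      | some i =>
        simp [loopB, tlps0, h1, h, ih, loopA, hne, Option.map_map]
        omega
    · by_cases h2 : c = '>'
      · have hne : ∀ d : Int, PySem.Chars.isspace c = true ∧ d = 0 → False := by
          intro d ⟨hs, _⟩; subst h2; simp [PySem.Chars.isspace] at hs
        cases h : tlps0 cs (max 0 (depth - 1)) with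
        | none => simp [loopB, tlps0, h1, h2, h, ih, loopA, hne _]
        | some i =>
          simp [loopB, tlps0, h1, h2, h, ih, loopA, hne _, Option.map_map]
          omega
      · by_cases hd : depth = 0
        · subst hd
          by_cases h3 : c = '('
          · have hns : PySem.Chars.isspace c = true → False := by
              intro hs; subst h3; simp [PySem.Chars.isspace] at hs
            simp [loopB, tlps0, h1, h2, h3, loopA, hns]
          · by_cases hs : PySem.Chars.isspace c = true
            · cases h : tlps0 cs 0 with
              | none => simp [loopB, tlps0, h1, h2, h3, hs, h, ih, loopA]
              | some i =>
                simp [loopB, tlps0, h1, h2, h3, hs, h, ih, loopA, Option.map_map]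
                omega
            · cases h : tlps0 cs 0 with
              | none => simp [loopB, tlps0, h1, h2, h3, hs, h, ih, loopA]
              | some i =>
                simp [loopB, tlps0, h1, h2, h3, hs, h, ih, loopA, Option.map_map]
                omega
        · cases h : tlps0 cs depth with
          | none => simp [loopB, tlps0, h1, h2, hd, h, ih, loopA]
          | some i =>
            simp [loopB, tlps0, h1, h2, hd, h, ih, loopA, Option.map_map]
            omega

-- ===== VERDICT (by name: the statement is the Claim_ definition above) =====
theorem display_kernel_name_py_spec : Claim_equal_display_kernel_name_py := by
  intro raw_name _
  unfold Spec_display_kernel_name_py display_kernel_name_py display_kernel_name_py_alt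
  simp only [loopB_eq, tlpsA_eq]
  cases h : tlps0 raw_name.toList 0 <;> simp [h]
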